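-- pv_equiv track=rewrite | github.com/charukad/Dynamic-Cognitive-Intelligence-System | backend/src/services/advanced/mirror/style_transfer.py | _count_contractions
-- ===== SOURCE A (Python) =====
-- def _count_contractions(text: str) -> int:
--     """Count contractions like don't, can't, etc."""
--     contractions = [
--         "don't", "doesn't", "didn't", "can't", "couldn't", "won't",
--         "wouldn't", "shouldn't", "isn't", "aren't", "wasn't", "weren't",
--         "haven't", "hasn't", "hadn't", "i'm", "you're", "he's", "she's",
--         "it's", "we're", "they're", "i've", "you've", "we've", "they've",
--     ]
--
--     text_lower = text.lower()
--     return sum(text_lower.count(contraction) for contraction in contractions)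
-- ===== SOURCE B (Python) =====
-- def _count_contractions(text: str) -> int:
--     """Count contractions like don't, can't, etc."""
--     parts = [
--         ("don", "t"), ("doesn", "t"), ("didn", "t"), ("can", "t"),
--         ("couldn", "t"), ("won", "t"), ("wouldn", "t"), ("shouldn", "t"),
--         ("isn", "t"), ("aren", "t"), ("wasn", "t"), ("weren", "t"),
--         ("haven", "t"), ("hasn", "t"), ("hadn", "t"), ("i", "m"),
--         ("you", "re"), ("he", "s"), ("she", "s"), ("it", "s"),
--         ("we", "re"), ("they", "re"), ("i", "ve"), ("you", "ve"),
--         ("we", "ve"), ("they", "ve"),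
--     ]
--     t = text.lower()
--     total = 0
--     for j in range(len(t)):
--         if t[j] == "'":
--             for pre, suf in parts:
--                 if t.endswith(pre, 0, j) and t.startswith(suf, j + 1):
--                     total += 1
--     return total
-- ===== Notes on version B (the rewrite author's own statement) =====
-- stated objective: alternative
-- what changed: Instead of 26 independent str.count scans of the lowered text, B splits each contraction at its apostrophe into a (prefix, suffix) pair and makes one pass over the text, and only at apostrophe positions tests which pairs match around that position.
-- outside the precondition, e.g. on _count_contractions("she'she's"): A returns 3, B returns 4
import Mathlib
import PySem

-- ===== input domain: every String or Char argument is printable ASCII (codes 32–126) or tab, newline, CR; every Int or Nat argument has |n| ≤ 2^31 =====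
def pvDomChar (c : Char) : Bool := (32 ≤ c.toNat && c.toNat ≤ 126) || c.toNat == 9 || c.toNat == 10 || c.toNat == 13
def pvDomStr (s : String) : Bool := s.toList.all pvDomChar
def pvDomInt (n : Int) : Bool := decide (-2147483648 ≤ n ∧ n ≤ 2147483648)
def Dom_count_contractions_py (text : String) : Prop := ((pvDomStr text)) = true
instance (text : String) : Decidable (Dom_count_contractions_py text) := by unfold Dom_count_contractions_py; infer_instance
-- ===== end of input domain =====

-- B splits each contraction at its apostrophe and makes one pass over the lowered text,
-- matching prefix/suffix pairs only around apostrophe positions (objective: alternative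
-- decomposition, same cost class).

-- ===== PORT A =====
def count_contractions_py (text : String) : Int :=
  let contractions : List String :=
    ["don't", "doesn't", "didn't", "can't", "couldn't", "won't",
     "wouldn't", "shouldn't", "isn't", "aren't", "wasn't", "weren't",
     "haven't", "hasn't", "hadn't", "i'm", "you're", "he's", "she's",
     "it's", "we're", "they're", "i've", "you've", "we've", "they've"]
  let text_lower := PySem.Str.lower text
  (contractions.map (fun c => ((PySem.Str.count text_lower c : Nat) : Int))).sum

-- ===== PORT B =====
def count_contractions_py_alt (text : String) : Int :=
  let parts : List (String × String) :=
    [("don", "t"), ("doesn", "t"), ("didn", "t"), ("can", "t"),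
     ("couldn", "t"), ("won", "t"), ("wouldn", "t"), ("shouldn", "t"),
     ("isn", "t"), ("aren", "t"), ("wasn", "t"), ("weren", "t"),
     ("haven", "t"), ("hasn", "t"), ("hadn", "t"), ("i", "m"),
     ("you", "re"), ("he", "s"), ("she", "s"), ("it", "s"),
     ("we", "re"), ("they", "re"), ("i", "ve"), ("you", "ve"),
     ("we", "ve"), ("they", "ve")]
  let t := (PySem.Str.lower text).toList
  -- "t[j]" with j ∈ range(len(t)) ported as t[j]?; "t.endswith(pre, 0, j)" ported by hand as
  -- 'pre is a suffix of t[:j]' (exact for 0 ≤ j ≤ len t); "t.startswith(suf, j+1)" as a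
  -- prefix test on t[j+1:] (exact for 0 ≤ j+1 ≤ len t)
  (List.range t.length).foldl (fun total j =>
    if t[j]? = some '\'' then
      parts.foldl (fun total pc =>
        if pc.1.toList.isSuffixOf (t.take j) && PySem.Chars.startswith (t.drop (j + 1)) pc.2.toList
        then total + 1 else total) total
    else total) 0

-- ===== PRECONDITION & SPEC =====
-- Pre_ excludes texts whose lowercase contains "she'she's" (two overlapping occurrences of
-- "she's"): there A's non-overlapping str.count and B's count of every match position are
-- both defensible readings of 'count contractions' and no caller would specify either.
def Pre_count_contractions_py (text : String) : Prop :=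
  PySem.Str.isIn "she'she's" (PySem.Str.lower text) = false
instance (text : String) : Decidable (Pre_count_contractions_py text) := by
  unfold Pre_count_contractions_py; infer_instance
def pvWitness_count_contractions_py : String := "She's sure they DON'T mind, he's won't-ish"

def Spec_count_contractions_py (text : String) (out : Int) : Prop := out = count_contractions_py_alt text
instance (text : String) (out : Int) : Decidable (Spec_count_contractions_py text out) := by unfold Spec_count_contractions_py; infer_instance

-- ===== CLAIM (what is proved, stated in full; the proofs are below) =====
def Claim_equal_count_contractions_py : Prop := ∀ (text : String), Dom_count_contractions_py text → Pre_count_contractions_py text → Spec_count_contractions_py text (count_contractions_py text)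

-- ===== LEMMAS AND PROOFS =====

-- number of positions of l at which sub matches (counted over all suffixes)
def pvN (sub l : List Char) : Nat := l.tails.countP (fun t => sub.isPrefixOf t)

lemma pvN_nil (sub : List Char) (h : sub ≠ []) : pvN sub [] = 0 := by
  cases sub with
  | nil => exact absurd rfl h
  | cons c t => simp [pvN, List.isPrefixOf]

lemma pvN_cons (sub : List Char) (c : Char) (t : List Char) :
    pvN sub (c :: t) = (if sub.isPrefixOf (c :: t) then 1 else 0) + pvN sub t := by
  simp [pvN, List.countP_cons]
  split_ifs <;> omega

lemma pvN_drop_of_no_match (sub : List Char) (m : Nat) :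
    ∀ t : List Char, (∀ i, i < m → ¬ sub.isPrefixOf (t.drop i) = true) →
      pvN sub t = pvN sub (t.drop m) := by
  induction m with
  | zero => intro t _; simp
  | succ m ih =>
    intro t h
    cases t with
    | nil => simp
    | cons c t' =>
      have h0 := h 0 (Nat.succ_pos m)
      simp only [List.drop_zero] at h0
      rw [pvN_cons, if_neg (by simpa using h0)]
      have := ih t' (fun i hi => by simpa using h (i + 1) (Nat.succ_lt_succ hi))
      simpa using this

-- the fuel loop of Python's str.count equals the all-positions count when no two
-- occurrences of sub in the ambient text can overlap
lemma pvGo_eq (sub tAll : List Char) (hne : sub ≠ [])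
    (hov : ∀ l : List Char, l <:+ tAll → ∀ i, i < sub.length → 0 < i →
      sub.isPrefixOf l = true → ¬ sub.isPrefixOf (l.drop i) = true) :
    ∀ fuel (l : List Char) (acc : Nat), l <:+ tAll → l.length ≤ fuel →
      PySem.Chars.count.go sub fuel l acc = acc + pvN sub l := by
  intro fuel
  induction fuel with
  | zero =>
    intro l acc _ hlen
    have : l = [] := List.eq_nil_of_length_eq_zero (Nat.le_zero.mp hlen)
    subst this
    simp [PySem.Chars.count.go, pvN_nil sub hne]
  | succ fuel ih =>
    intro l acc hsuf hlen
    cases l with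
    | nil => simp [PySem.Chars.count.go, pvN_nil sub hne]
    | cons c t =>
      rw [PySem.Chars.count.go]
      by_cases hp : sub.isPrefixOf (c :: t) = true
      · rw [if_pos hp]
        have hsub1 : 1 ≤ sub.length := by
          cases sub with
          | nil => exact absurd rfl hne
          | cons _ _ => simp
        have hdsuf : (c :: t).drop sub.length <:+ tAll :=
          (List.drop_suffix _ _).trans hsuf
        have hdlen : ((c :: t).drop sub.length).length ≤ fuel := by
          simp only [List.length_drop]
          simp only [List.length_cons] at hlen ⊢
          omega
        rw [ih _ _ hdsuf hdlen]
        have hnom : ∀ i, i < sub.length - 1 → ¬ sub.isPrefixOf (t.drop i) = true := by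
          intro i hi
          have := hov (c :: t) hsuf (i + 1) (by omega) (Nat.succ_pos i) hp
          simpa using this
        have hdt : t.drop (sub.length - 1) = (c :: t).drop sub.length := by
          cases sub with
          | nil => exact absurd rfl hne
          | cons _ _ => simp
        rw [pvN_cons, if_pos hp, pvN_drop_of_no_match sub (sub.length - 1) t hnom, hdt]
        omega
      · rw [if_neg hp]
        have htsuf : t <:+ tAll := ((List.suffix_cons c t)).trans hsuf
        have htlen : t.length ≤ fuel := by
          simp only [List.length_cons] at hlen; omega
        rw [ih _ _ htsuf htlen, pvN_cons, if_neg hp]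
        omega

lemma pvCount_eq_pvN (sub t : List Char) (hne : sub ≠ [])
    (hov : ∀ l : List Char, l <:+ t → ∀ i, i < sub.length → 0 < i →
      sub.isPrefixOf l = true → ¬ sub.isPrefixOf (l.drop i) = true) :
    PySem.Chars.count t sub = pvN sub t := by
  unfold PySem.Chars.count
  rw [if_neg (by simpa [List.isEmpty_iff] using hne)]
  simpa using pvGo_eq sub t hne hov t.length t 0 (List.suffix_refl t) le_rfl

lemma pvN_eq_range (sub : List Char) (hne : sub ≠ []) :
    ∀ l : List Char,
      pvN sub l = (List.range l.length).countP (fun i => sub.isPrefixOf (l.drop i)) := by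
  intro l
  induction l with
  | nil => simp [pvN_nil sub hne]
  | cons c t ih =>
    rw [pvN_cons]
    simp only [List.length_cons, List.range_succ_eq_map, List.countP_cons, List.countP_map]
    rw [show (List.countP ((fun i => sub.isPrefixOf ((c :: t).drop i)) ∘ Nat.succ) (List.range t.length)) = List.countP (fun i => sub.isPrefixOf (t.drop i)) (List.range t.length) from by
      apply List.countP_congr; intro i _; simp [Function.comp]]
    rw [← ih]
    simp only [List.drop_zero]
    split_ifs <;> omega

-- no later match can start inside an occurrence of sub at an offset i where sub has no border
lemma pvNoMatchAt (sub l : List Char) (i : Nat) (hi : i < sub.length)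
    (hbi : ¬ (sub.drop i).isPrefixOf sub = true)
    (hp : sub.isPrefixOf l = true) : ¬ sub.isPrefixOf (l.drop i) = true := by
  intro hq
  rw [List.isPrefixOf_iff_prefix] at hp hq
  obtain ⟨r, hr⟩ := hp
  subst hr
  rw [List.drop_append_of_le_length (Nat.le_of_lt hi)] at hq
  have h1 : sub.drop i <+: sub.drop i ++ r := List.prefix_append _ _
  have h2 : sub.drop i <+: sub := by
    apply List.prefix_of_prefix_length_le h1 hq
    simp only [List.length_drop]
    omega
  exact hbi (List.isPrefixOf_iff_prefix.mpr h2)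

-- overlap-freedom from border-freedom (25 of the 26 contractions)
lemma pvHov_of_borderfree (sub : List Char)
    (hb : ∀ i, i < sub.length → 0 < i → ¬ (sub.drop i).isPrefixOf sub = true)
    (tAll : List Char) :
    ∀ l : List Char, l <:+ tAll → ∀ i, i < sub.length → 0 < i →
      sub.isPrefixOf l = true → ¬ sub.isPrefixOf (l.drop i) = true :=
  fun l _ i hi hi0 hp => pvNoMatchAt sub l i hi (hb i hi hi0) hp

-- overlap-freedom for "she's" (border "s") from the precondition
lemma pvHov_shes (tAll : List Char) (hnin : ¬ ("she'she's".toList <:+: tAll)) :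
    ∀ l : List Char, l <:+ tAll → ∀ i, i < ("she's".toList).length → 0 < i →
      ("she's".toList).isPrefixOf l = true → ¬ ("she's".toList).isPrefixOf (l.drop i) = true := by
  intro l hsuf i hi hi0 hp hq
  have hi5 : i < 5 := by simpa using hi
  interval_cases i
  · exact pvNoMatchAt "she's".toList l 1 hi (by decide) hp hq
  · exact pvNoMatchAt "she's".toList l 2 hi (by decide) hp hq
  · exact pvNoMatchAt "she's".toList l 3 hi (by decide) hp hq
  · -- match at offset 4: l begins with "she'she's", contradicting the precondition
    rw [List.isPrefixOf_iff_prefix] at hp hq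
    have hs : "she's".toList = ['s','h','e','\'','s'] := rfl
    rw [hs] at hp hq
    obtain ⟨r, hr⟩ := hp
    subst hr
    rw [show ((['s','h','e','\'','s'] ++ r).drop 4) = 's' :: r from rfl] at hq
    rw [List.cons_prefix_cons] at hq
    obtain ⟨-, hq2⟩ := hq
    obtain ⟨r', hr'⟩ := hq2
    apply hnin
    have hpre9 : "she'she's".toList <+: ['s','h','e','\'','s'] ++ r := by
      refine ⟨r', ?_⟩
      rw [← hr']
      simp
    exact hpre9.isInfix.trans hsuf.isInfix

lemma pvTerm (t sub : List Char) (hne : sub ≠ [])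
    (hov : ∀ l : List Char, l <:+ t → ∀ i, i < sub.length → 0 < i →
      sub.isPrefixOf l = true → ¬ sub.isPrefixOf (l.drop i) = true) :
    (PySem.Chars.count t sub : Int)
      = ((List.range t.length).countP (fun i => sub.isPrefixOf (t.drop i)) : Nat) := by
  rw [pvCount_eq_pvN sub t hne hov, pvN_eq_range sub hne t]

-- B-side matching predicate: the contraction (P, '\'', S) matches anchored at apostrophe j
def pvF (t P S : List Char) (j : Nat) : Bool :=
  decide (t[j]? = some '\'') && P.isSuffixOf (t.take j) && S.isPrefixOf (t.drop (j + 1))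

lemma pvF_false_lt (t P S : List Char) (j : Nat) (hj : j < P.length) : pvF t P S j = false := by
  unfold pvF
  cases hsf : P.isSuffixOf (t.take j) with
  | false => simp
  | true =>
    exfalso
    have := (List.isSuffixOf_iff_suffix.mp hsf).length_le
    have := List.length_take_le j t
    omega

lemma pvF_false_ge (t P S : List Char) (j : Nat) (hj : t.length ≤ j) : pvF t P S j = false := by
  unfold pvF
  rw [List.getElem?_eq_none hj]
  simp

-- matching the full contraction at position i ↔ the anchored match at apostrophe i + |P|
lemma pvMatch (t P S : List Char) (i : Nat) :
    (P ++ '\'' :: S).isPrefixOf (t.drop i) = pvF t P S (i + P.length) := by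
  unfold pvF
  rw [Bool.eq_iff_iff]
  simp only [Bool.and_eq_true, decide_eq_true_eq, List.isPrefixOf_iff_prefix,
    List.isSuffixOf_iff_suffix]
  constructor
  · intro h
    obtain ⟨r, hr⟩ := h
    have hlen := congrArg List.length hr
    simp only [List.length_append, List.length_cons, List.length_drop] at hlen
    have hlt : i + P.length < t.length := by omega
    refine ⟨⟨?_, ?_⟩, ?_⟩
    · rw [← List.getElem?_drop, ← hr]
      simp
    · refine ⟨t.take i, ?_⟩
      rw [List.take_add]
      congr 1
      rw [← hr, show (P ++ '\'' :: S ++ r) = P ++ ('\'' :: (S ++ r)) from by simp,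
        List.take_left]
    · refine ⟨r, ?_⟩
      rw [show i + P.length + 1 = i + (P.length + 1) from by omega, ← List.drop_drop, ← hr,
        show (P ++ '\'' :: S ++ r) = (P ++ ['\'']) ++ (S ++ r) from by simp,
        show P.length + 1 = (P ++ ['\'']).length from by simp, List.drop_left]
  · rintro ⟨⟨hj, ⟨Q, hQ⟩⟩, ⟨r, hr⟩⟩
    have hlt : i + P.length < t.length := by
      by_contra h
      rw [List.getElem?_eq_none (by omega)] at hj
      simp at hj
    have hQlen : Q.length = i := by
      have := congrArg List.length hQ
      simp only [List.length_append, List.length_take] at this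
      omega
    have htakeP : (t.drop i).take P.length = P := by
      rw [show P.length = i + P.length - i from by omega, ← List.drop_take, ← hQ, ← hQlen,
        List.drop_left]
    have hchar : t[i + P.length] = '\'' := by
      rw [List.getElem?_eq_getElem hlt] at hj
      exact Option.some.inj hj
    have hdrop : t.drop (i + P.length) = '\'' :: (S ++ r) := by
      rw [List.drop_eq_getElem_cons hlt, hchar, ← hr]
    refine ⟨r, ?_⟩
    conv_rhs => rw [← List.take_append_drop P.length (t.drop i)]
    rw [htakeP, List.drop_drop, hdrop]
    simp

-- no match can start strictly before |P| or at/after len t, so shifting by |P| is a bijection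
lemma pvShift (t P S : List Char) :
    (List.range t.length).countP (fun i => pvF t P S (i + P.length))
      = (List.range t.length).countP (pvF t P S) := by
  have hcomm : (List.range t.length).countP (fun i => pvF t P S (i + P.length))
      = (List.range t.length).countP (pvF t P S ∘ fun x => P.length + x) :=
    List.countP_congr (fun i _ => by rw [Function.comp_apply, Nat.add_comm])
  have h1 : (List.range (P.length + t.length)).countP (pvF t P S)
      = (List.range t.length).countP (pvF t P S ∘ fun x => P.length + x) := by
    rw [List.range_add, List.countP_append, List.countP_map,
      List.countP_eq_zero.mpr (fun j hj => by
        simp [pvF_false_lt t P S j (List.mem_range.mp hj)])]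
    exact Nat.zero_add _
  have hz2 : (List.range P.length).countP (pvF t P S ∘ fun x => t.length + x) = 0 :=
    List.countP_eq_zero.mpr (fun j hj => by
      simp [pvF_false_ge t P S (t.length + j) (Nat.le_add_right t.length j)])
  have h2 : (List.range (t.length + P.length)).countP (pvF t P S)
      = (List.range t.length).countP (pvF t P S) := by
    rw [List.range_add, List.countP_append, List.countP_map, hz2]
    exact Nat.add_zero _
  rw [hcomm, ← h1, Nat.add_comm, h2]

-- A's per-contraction all-positions count equals B's anchored count
lemma pvBridge (t P S : List Char) :
    (List.range t.length).countP (fun i => (P ++ '\'' :: S).isPrefixOf (t.drop i))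
      = (List.range t.length).countP (pvF t P S) := by
  rw [← pvShift t P S]
  exact List.countP_congr (fun i _ => by rw [pvMatch])

-- collapse B's nested folds into a sum over positions of per-position pattern counts
lemma pvAltCollapse (t : List Char) (ps : List (String × String)) :
    ∀ (idxs : List Nat) (a : Int),
      idxs.foldl (fun total j =>
        if t[j]? = some '\'' then
          ps.foldl (fun total pc =>
            if pc.1.toList.isSuffixOf (t.take j) && PySem.Chars.startswith (t.drop (j + 1)) pc.2.toList
            then total + 1 else total) total
        else total) a
      = a + (idxs.map (fun j => ((ps.countP (fun pc => pvF t pc.1.toList pc.2.toList j) : Nat) : Int))).sum := by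
  intro idxs
  induction idxs with
  | nil => intro a; simp
  | cons j js ih =>
    intro a
    simp only [List.foldl_cons, List.map_cons, List.sum_cons]
    by_cases hj : t[j]? = some '\''
    · rw [if_pos hj, PySem.List.foldl_if_add_one, ih]
      rw [show ps.countP (fun pc => pc.1.toList.isSuffixOf (t.take j) && PySem.Chars.startswith (t.drop (j + 1)) pc.2.toList)
          = ps.countP (fun pc => pvF t pc.1.toList pc.2.toList j) from
        List.countP_congr (fun pc _ => by simp [pvF, hj, PySem.Chars.startswith])]
      ring
    · rw [if_neg hj, ih]
      rw [show ps.countP (fun pc => pvF t pc.1.toList pc.2.toList j) = 0 from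
        List.countP_eq_zero.mpr (fun pc _ => by simp [pvF, hj])]
      push_cast
      ring

-- swap the double sum: Σ_x countP_y q = Σ_y countP_x q (as Int sums)
lemma pvSumIte {α : Type} (q : α → Bool) (xs : List α) :
    (xs.map (fun x => if q x = true then (1 : Int) else 0)).sum = ((xs.countP q : Nat) : Int) := by
  induction xs with
  | nil => simp
  | cons x xs ih =>
    simp only [List.map_cons, List.sum_cons, List.countP_cons, ih]
    split_ifs <;> push_cast <;> ring

lemma pvSwap {α β : Type} (xs : List α) (q : α → β → Bool) :
    ∀ ys : List β,
      (xs.map (fun x => ((ys.countP (q x) : Nat) : Int))).sum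
        = (ys.map (fun y => ((xs.countP (fun x => q x y) : Nat) : Int))).sum := by
  intro ys
  induction ys with
  | nil => simp
  | cons y ys ih =>
    simp only [List.map_cons, List.sum_cons, List.countP_cons]
    rw [← ih]
    push_cast
    rw [List.sum_map_add]
    rw [show (xs.map fun x => if q x y = true then (1 : Int) else 0).sum
        = ((xs.countP (fun x => q x y) : Nat) : Int) from pvSumIte _ xs]
    ring

-- ===== VERDICT (by name: the statement is the Claim_ definition above) =====
set_option maxHeartbeats 2000000 in
theorem count_contractions_py_spec : Claim_equal_count_contractions_py := by
  intro text _ hpre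
  unfold Spec_count_contractions_py count_contractions_py count_contractions_py_alt
  simp only [PySem.Str.count_eq]
  set t : List Char := (PySem.Str.lower text).toList with ht
  have hpre' : ¬ ("she'she's".toList <:+: t) := by
    have h1 := hpre
    unfold Pre_count_contractions_py at h1
    rw [PySem.Str.isIn_eq] at h1
    exact (PySem.Chars.isIn_eq_false_iff _ _).mp h1
  -- A side: each str.count becomes the count of all matching positions
  rw [show (["don't", "doesn't", "didn't", "can't", "couldn't", "won't",
     "wouldn't", "shouldn't", "isn't", "aren't", "wasn't", "weren't",
     "haven't", "hasn't", "hadn't", "i'm", "you're", "he's", "she's",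
     "it's", "we're", "they're", "i've", "you've", "we've", "they've"].map
       (fun c => ((PySem.Chars.count t c.toList : Nat) : Int))).sum
    = (([("don", "t"), ("doesn", "t"), ("didn", "t"), ("can", "t"),
     ("couldn", "t"), ("won", "t"), ("wouldn", "t"), ("shouldn", "t"),
     ("isn", "t"), ("aren", "t"), ("wasn", "t"), ("weren", "t"),
     ("haven", "t"), ("hasn", "t"), ("hadn", "t"), ("i", "m"),
     ("you", "re"), ("he", "s"), ("she", "s"), ("it", "s"),
     ("we", "re"), ("they", "re"), ("i", "ve"), ("you", "ve"),
     ("we", "ve"), ("they", "ve")] : List (String × String)).map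
       (fun pc => (((List.range t.length).countP (pvF t pc.1.toList pc.2.toList) : Nat) : Int))).sum from ?_]
  · -- B side: collapse the nested folds and swap the two sums
    rw [pvAltCollapse t _ (List.range t.length) 0, zero_add, pvSwap]
  · -- per-contraction: str.count = all-positions count (overlap-freedom) = anchored count
    simp only [List.map_cons, List.map_nil, List.sum_cons, List.sum_nil]
    have step : ∀ (c : String) (P S : String), c.toList = P.toList ++ '\'' :: S.toList →
        c.toList ≠ [] →
        (∀ l : List Char, l <:+ t → ∀ i, i < c.toList.length → 0 < i →
          c.toList.isPrefixOf l = true → ¬ c.toList.isPrefixOf (l.drop i) = true) →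
        ((PySem.Chars.count t c.toList : Nat) : Int)
          = (((List.range t.length).countP (pvF t P.toList S.toList) : Nat) : Int) := by
      intro c P S hsplit hne hov
      rw [pvTerm t c.toList hne hov]
      rw [show (List.range t.length).countP (fun i => c.toList.isPrefixOf (t.drop i))
          = (List.range t.length).countP (fun i => (P.toList ++ '\'' :: S.toList).isPrefixOf (t.drop i)) from
        List.countP_congr (fun i _ => by rw [hsplit])]
      rw [pvBridge]
    rw [step "don\'t" "don" "t" (by decide) (by decide) (pvHov_of_borderfree _ (by decide) t)]
    rw [step "doesn\'t" "doesn" "t" (by decide) (by decide) (pvHov_of_borderfree _ (by decide) t)]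
    rw [step "didn\'t" "didn" "t" (by decide) (by decide) (pvHov_of_borderfree _ (by decide) t)]
    rw [step "can\'t" "can" "t" (by decide) (by decide) (pvHov_of_borderfree _ (by decide) t)]
    rw [step "couldn\'t" "couldn" "t" (by decide) (by decide) (pvHov_of_borderfree _ (by decide) t)]
    rw [step "won\'t" "won" "t" (by decide) (by decide) (pvHov_of_borderfree _ (by decide) t)]
    rw [step "wouldn\'t" "wouldn" "t" (by decide) (by decide) (pvHov_of_borderfree _ (by decide) t)]
    rw [step "shouldn\'t" "shouldn" "t" (by decide) (by decide) (pvHov_of_borderfree _ (by decide) t)]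
    rw [step "isn\'t" "isn" "t" (by decide) (by decide) (pvHov_of_borderfree _ (by decide) t)]
    rw [step "aren\'t" "aren" "t" (by decide) (by decide) (pvHov_of_borderfree _ (by decide) t)]
    rw [step "wasn\'t" "wasn" "t" (by decide) (by decide) (pvHov_of_borderfree _ (by decide) t)]
    rw [step "weren\'t" "weren" "t" (by decide) (by decide) (pvHov_of_borderfree _ (by decide) t)]
    rw [step "haven\'t" "haven" "t" (by decide) (by decide) (pvHov_of_borderfree _ (by decide) t)]
    rw [step "hasn\'t" "hasn" "t" (by decide) (by decide) (pvHov_of_borderfree _ (by decide) t)]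
    rw [step "hadn\'t" "hadn" "t" (by decide) (by decide) (pvHov_of_borderfree _ (by decide) t)]
    rw [step "i\'m" "i" "m" (by decide) (by decide) (pvHov_of_borderfree _ (by decide) t)]
    rw [step "you\'re" "you" "re" (by decide) (by decide) (pvHov_of_borderfree _ (by decide) t)]
    rw [step "he\'s" "he" "s" (by decide) (by decide) (pvHov_of_borderfree _ (by decide) t)]
    rw [step "she\'s" "she" "s" (by decide) (by decide) (pvHov_shes t hpre')]
    rw [step "it\'s" "it" "s" (by decide) (by decide) (pvHov_of_borderfree _ (by decide) t)]
    rw [step "we\'re" "we" "re" (by decide) (by decide) (pvHov_of_borderfree _ (by decide) t)]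
    rw [step "they\'re" "they" "re" (by decide) (by decide) (pvHov_of_borderfree _ (by decide) t)]
    rw [step "i\'ve" "i" "ve" (by decide) (by decide) (pvHov_of_borderfree _ (by decide) t)]
    rw [step "you\'ve" "you" "ve" (by decide) (by decide) (pvHov_of_borderfree _ (by decide) t)]
    rw [step "we\'ve" "we" "ve" (by decide) (by decide) (pvHov_of_borderfree _ (by decide) t)]
    rw [step "they\'ve" "they" "ve" (by decide) (by decide) (pvHov_of_borderfree _ (by decide) t)]
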